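-- pv_equiv track=rewrite | github.com/rduivenvoorde/pdokservicesplugin | pdokservicesspider/spider.py | join_lists_by_property
-- ===== SOURCE A (Python) =====
-- import itertools
--
-- def join_lists_by_property(list_1, list_2, prop_name):
--     lst = sorted(itertools.chain(list_1, list_2), key=lambda x: x[prop_name])
--     result = []
--     for k, v in itertools.groupby(lst, key=lambda x: x[prop_name]):
--         d = {}
--         for dct in v:
--             d.update(dct)
--         result.append(d)
--     return result
-- ===== SOURCE B (Python) =====
-- import itertools
--
-- def join_lists_by_property(list_1, list_2, prop_name):
--     merged = {}
--     for dct in itertools.chain(list_1, list_2):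
--         merged.setdefault(dct[prop_name], {}).update(dct)
--     return [merged[k] for k in sorted(merged)]
-- ===== Notes on version B (the rewrite author's own statement) =====
-- stated objective: idiomatic
-- what changed: Replaces sorting the whole concatenated list and merging consecutive groupby runs with a single pass that merges each dict into a hash map keyed by its prop_name value, then sorts only the distinct keys.
import Mathlib
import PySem

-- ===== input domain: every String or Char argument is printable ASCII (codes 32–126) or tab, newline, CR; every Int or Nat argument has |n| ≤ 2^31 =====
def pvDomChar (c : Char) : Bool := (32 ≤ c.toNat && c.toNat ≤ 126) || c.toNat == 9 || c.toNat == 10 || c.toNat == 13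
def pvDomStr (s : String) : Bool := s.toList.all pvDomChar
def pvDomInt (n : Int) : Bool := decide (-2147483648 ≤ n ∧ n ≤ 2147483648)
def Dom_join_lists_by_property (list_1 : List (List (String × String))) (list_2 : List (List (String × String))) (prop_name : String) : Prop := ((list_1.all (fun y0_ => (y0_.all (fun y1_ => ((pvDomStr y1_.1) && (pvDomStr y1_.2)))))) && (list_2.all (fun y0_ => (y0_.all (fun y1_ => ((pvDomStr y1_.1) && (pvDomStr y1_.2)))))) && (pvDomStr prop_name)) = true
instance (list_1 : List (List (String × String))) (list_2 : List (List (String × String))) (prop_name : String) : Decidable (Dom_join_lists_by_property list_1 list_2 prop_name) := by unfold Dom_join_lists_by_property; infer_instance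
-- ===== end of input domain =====

-- B replaces A's sort-everything-then-groupby with a single merging pass into a dict keyed by
-- the prop_name value followed by a sort of the distinct keys only (idiomatic restructuring).

-- ===== PORT A =====
-- itertools.groupby(l, key) on a materialised list: runs of consecutive elements with equal key
def pyGroupBy {α κ : Type} [BEq κ] (key : α → κ) : List α → List (κ × List α)
  | [] => []
  | x :: t =>
      (key x, x :: t.takeWhile (fun y => key y == key x)) ::
        pyGroupBy key (t.dropWhile (fun y => key y == key x))
termination_by l => l.length
decreasing_by
  simpa using Nat.lt_succ_of_le (List.length_dropWhile_le _ _)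

def join_lists_by_property (list_1 : List (List (String × String))) (list_2 : List (List (String × String))) (prop_name : String) : List (List (String × String)) :=
  -- lst = sorted(itertools.chain(list_1, list_2), key=lambda x: x[prop_name])
  let lst := PySem.List.sorted ((list_1 ++ list_2).map PySem.Dict.mk)
      (fun x => x.getD prop_name "") false
  -- for k, v in groupby(lst, key=…): d = {}; for dct in v: d.update(dct); result.append(d)
  (pyGroupBy (fun x => PySem.Dict.getD x prop_name "") lst).foldl
    (fun result kv =>
      result ++ [(kv.2.foldl (fun d dct => d.update dct.items)
        (PySem.Dict.empty : PySem.Dict String String)).items]) []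

-- ===== PORT B =====
def join_lists_by_property_alt (list_1 : List (List (String × String))) (list_2 : List (List (String × String))) (prop_name : String) : List (List (String × String)) :=
  -- for dct in chain(list_1, list_2): merged.setdefault(dct[prop_name], {}).update(dct)
  -- (setdefault + in-place update of the looked-up value = Dict.modify at that key)
  let merged := (list_1 ++ list_2).foldl
    (fun m dl => m.modify ((PySem.Dict.mk dl).getD prop_name "") PySem.Dict.empty
      (fun g => g.update dl))
    (PySem.Dict.empty : PySem.Dict String (PySem.Dict String String))
  -- [merged[k] for k in sorted(merged)]
  (PySem.List.sorted merged.keys (fun k => k) false).map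
    (fun k => (merged.getD k PySem.Dict.empty).items)

-- ===== PRECONDITION & SPEC =====
-- Pre_ excludes exactly the inputs where some dict lacks the prop_name key: there both Pythons raise KeyError.
def Pre_join_lists_by_property (list_1 : List (List (String × String))) (list_2 : List (List (String × String))) (prop_name : String) : Prop :=
  ∀ dl ∈ list_1 ++ list_2, (PySem.Dict.mk dl).contains prop_name = true
instance (list_1 : List (List (String × String))) (list_2 : List (List (String × String))) (prop_name : String) : Decidable (Pre_join_lists_by_property list_1 list_2 prop_name) := by unfold Pre_join_lists_by_property; infer_instance

def pvWitness_join_lists_by_property : (List (List (String × String))) × (List (List (String × String))) × String :=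
  ([[("id", "b"), ("x", "1")]], [[("id", "a")], [("id", "b"), ("y", "2")]], "id")

def Spec_join_lists_by_property (list_1 : List (List (String × String))) (list_2 : List (List (String × String))) (prop_name : String) (out : List (List (String × String))) : Prop := out = join_lists_by_property_alt list_1 list_2 prop_name
instance (list_1 : List (List (String × String))) (list_2 : List (List (String × String))) (prop_name : String) (out : List (List (String × String))) : Decidable (Spec_join_lists_by_property list_1 list_2 prop_name out) := by unfold Spec_join_lists_by_property; infer_instance

-- ===== CLAIM (what is proved, stated in full; the proofs are below) =====
def Claim_equal_join_lists_by_property : Prop := ∀ (list_1 : List (List (String × String))) (list_2 : List (List (String × String))) (prop_name : String), Dom_join_lists_by_property list_1 list_2 prop_name → Pre_join_lists_by_property list_1 list_2 prop_name → Spec_join_lists_by_property list_1 list_2 prop_name (join_lists_by_property list_1 list_2 prop_name)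

-- ===== LEMMAS AND PROOFS =====

-- the first key of each run of consecutive equal keys
def firstKeys {α κ : Type} [BEq κ] (key : α → κ) : List α → List κ
  | [] => []
  | x :: t => key x :: firstKeys key (t.dropWhile (fun y => key y == key x))
termination_by l => l.length
decreasing_by
  simpa using Nat.lt_succ_of_le (List.length_dropWhile_le _ _)

theorem mem_firstKeys {α : Type} (key : α → String) :
    ∀ (l : List α) (k : String), k ∈ firstKeys key l ↔ k ∈ l.map key := by
  intro l
  induction l using firstKeys.induct (key := key) with
  | case1 => simp [firstKeys]
  | case2 x t ih =>
    intro k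
    simp only [firstKeys, List.mem_cons, List.map_cons, ih]
    constructor
    · rintro (rfl | h)
      · exact Or.inl rfl
      · rcases List.mem_map.1 h with ⟨z, hz, rfl⟩
        exact Or.inr (List.mem_map_of_mem ((List.dropWhile_sublist _).subset hz))
    · rintro (rfl | h)
      · exact Or.inl rfl
      · rcases List.mem_map.1 h with ⟨z, hz, rfl⟩
        rcases List.mem_append.1 ((List.takeWhile_append_dropWhile (l := t)
            (p := fun y => key y == key x) ▸ hz) : z ∈ _) with hz1 | hz2
        · exact Or.inl (by simpa using (List.mem_takeWhile_imp hz1))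
        · exact Or.inr (List.mem_map_of_mem hz2)

-- stability of Python's sort: filtering one key value commutes with sorting
theorem filter_insertBy {α : Type} (key : α → String) (c : String) (x : α) :
    ∀ ys : List α, ys.Pairwise (fun a b => key a ≤ key b) →
    (PySem.List.insertBy (fun a b => decide (key a < key b)) x ys).filter (fun y => key y == c)
    = if key x == c then ys.filter (fun y => key y == c) ++ [x]
      else ys.filter (fun y => key y == c) := by
  intro ys
  induction ys with
  | nil =>
    intro _
    by_cases h : key x == c <;> simp [PySem.List.insertBy, h]
  | cons y t ih =>
    intro hp
    rcases List.pairwise_cons.1 hp with ⟨hy, ht⟩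
    by_cases hb : key x < key y
    · have hall : ∀ z ∈ y :: t, key x < key z := by
        intro z hz
        rcases List.mem_cons.1 hz with rfl | hz
        · exact hb
        · exact lt_of_lt_of_le hb (hy z hz)
      by_cases hc : key x == c
      · have hc' : key x = c := by simpa using hc
        have hyc : (key y == c) = false := by
          simp only [beq_eq_false_iff_ne]
          exact fun h => absurd (hc' ▸ h) (ne_of_gt (hall y (List.mem_cons_self)))
        have htnil : t.filter (fun z => key z == c) = [] := by
          refine List.filter_eq_nil_iff.2 ?_
          intro z hz
          simp only [beq_iff_eq]
          exact fun h => absurd (hc' ▸ h) (ne_of_gt (hall z (List.mem_cons_of_mem _ hz)))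
        simp [PySem.List.insertBy, hb, hc, hyc, htnil]
      · simp [PySem.List.insertBy, hb, hc]
    · have hstep : PySem.List.insertBy (fun a b => decide (key a < key b)) x (y :: t)
          = y :: PySem.List.insertBy (fun a b => decide (key a < key b)) x t := by
        simp [PySem.List.insertBy, hb]
      rw [hstep, List.filter_cons, ih ht, List.filter_cons]
      by_cases hc : key x == c <;> by_cases hyc : key y == c <;> simp [hc, hyc]

theorem sorted_filter_key {α : Type} (key : α → String) (c : String) (l : List α) :
    (PySem.List.sorted l key false).filter (fun y => key y == c)
    = l.filter (fun y => key y == c) := by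
  induction l using List.reverseRecOn with
  | nil => rfl
  | append_singleton l x ih =>
    have hs : PySem.List.sorted (l ++ [x]) key false
        = PySem.List.insertBy (fun a b => decide (key a < key b)) x
            (PySem.List.sorted l key false) := by
      rw [PySem.List.sorted_eq_foldl_insertBy, PySem.List.sorted_eq_foldl_insertBy,
        List.foldl_append]
      rfl
    rw [hs, filter_insertBy key c x _ (PySem.List.sorted_pairwise l key),
      List.filter_append, ih, List.filter_cons]
    by_cases h : key x == c <;> simp [h]

-- everything after the first run of a key-ascending list has a strictly larger key
theorem dropWhile_key_gt {α : Type} (key : α → String) (x : α) :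
    ∀ t : List α, t.Pairwise (fun a b => key a ≤ key b) → (∀ y ∈ t, key x ≤ key y) →
    ∀ z ∈ t.dropWhile (fun y => key y == key x), key x < key z := by
  intro t
  induction t with
  | nil => intro _ _ z hz; simp at hz
  | cons y t ih =>
    intro hp hb z hz
    rcases List.pairwise_cons.1 hp with ⟨hy, ht⟩
    by_cases h : key y == key x
    · simp only [List.dropWhile_cons, h, if_true] at hz
      exact ih ht (fun w hw => hb w (List.mem_cons_of_mem _ hw)) z hz
    · simp only [List.dropWhile_cons, h, if_false, Bool.false_eq_true] at hz
      have hxy : key x < key y :=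
        lt_of_le_of_ne (hb y List.mem_cons_self) (fun e => h (by simp [e.symm]))
      rcases List.mem_cons.1 hz with rfl | hz
      · exact hxy
      · exact lt_of_lt_of_le hxy (hy z hz)

-- groupby of a key-ascending list: one run per distinct key, the run is the filter
theorem pyGroupBy_eq {α : Type} (key : α → String) :
    ∀ l : List α, l.Pairwise (fun a b => key a ≤ key b) →
    pyGroupBy key l = (firstKeys key l).map (fun k => (k, l.filter (fun y => key y == k))) := by
  intro l
  induction l using pyGroupBy.induct (key := key) with
  | case1 => intro _; simp [pyGroupBy, firstKeys]
  | case2 x t ih =>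
    intro hp
    rcases List.pairwise_cons.1 hp with ⟨hx, ht⟩
    have hrest : (t.dropWhile (fun y => key y == key x)).Pairwise
        (fun a b => key a ≤ key b) := ht.sublist (List.dropWhile_sublist _)
    have hgt := dropWhile_key_gt key x t ht hx
    have hsplit := List.takeWhile_append_dropWhile (p := fun y => key y == key x) (l := t)
    have htake : t.filter (fun y => key y == key x) = t.takeWhile (fun y => key y == key x) := by
      conv_lhs => rw [← hsplit]
      rw [List.filter_append]
      rw [List.filter_eq_self.2
          (fun z hz => by exact List.mem_takeWhile_imp (p := fun y => key y == key x) hz),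
        List.filter_eq_nil_iff.2 (fun z hz => by
          simp only [beq_iff_eq]; exact fun e => absurd e (ne_of_gt (hgt z hz))),
        List.append_nil]
    have hrun : x :: t.takeWhile (fun y => key y == key x)
        = (x :: t).filter (fun y => key y == key x) := by
      rw [List.filter_cons]
      simp only [beq_self_eq_true, if_true, htake]
    have hother : ∀ k ∈ firstKeys key (t.dropWhile (fun y => key y == key x)),
        (x :: t).filter (fun y => key y == k)
          = (t.dropWhile (fun y => key y == key x)).filter (fun y => key y == k) := by
      intro k hk
      have hk' : k ∈ (t.dropWhile (fun y => key y == key x)).map key :=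
        (mem_firstKeys key _ k).1 hk
      rcases List.mem_map.1 hk' with ⟨z, hz, rfl⟩
      have hxk : key x < key z := hgt z hz
      rw [List.filter_cons]
      rw [if_neg (by simp only [beq_iff_eq]; exact fun e => absurd e (ne_of_lt hxk))]
      conv_lhs => rw [← hsplit]
      rw [List.filter_append,
        List.filter_eq_nil_iff.2 (fun w hw => by
          have hw' : key w = key x := by
            simpa using List.mem_takeWhile_imp (p := fun y => key y == key x) hw
          simp only [beq_iff_eq, hw']
          exact fun e => absurd e (ne_of_lt hxk)),
        List.nil_append]
    simp only [pyGroupBy, firstKeys, List.map_cons]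
    congr 1
    · rw [hrun]
    · rw [ih hrest]
      apply List.map_congr_left
      intro k hk
      rw [hother k hk]

theorem pairwise_firstKeys {α : Type} (key : α → String) :
    ∀ l : List α, l.Pairwise (fun a b => key a ≤ key b) →
    (firstKeys key l).Pairwise (· < ·) := by
  intro l
  induction l using firstKeys.induct (key := key) with
  | case1 => intro _; simp [firstKeys]
  | case2 x t ih =>
    intro hp
    rcases List.pairwise_cons.1 hp with ⟨hx, ht⟩
    have hrest : (t.dropWhile (fun y => key y == key x)).Pairwise
        (fun a b => key a ≤ key b) := ht.sublist (List.dropWhile_sublist _)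
    have hgt := dropWhile_key_gt key x t ht hx
    simp only [firstKeys]
    refine List.pairwise_cons.2 ⟨?_, ih hrest⟩
    intro k hk
    rcases List.mem_map.1 ((mem_firstKeys key _ k).1 hk) with ⟨z, hz, rfl⟩
    exact hgt z hz

-- what B's modify-loop holds at one key: the fold of the group filtered out of the input
theorem getD_foldl_modify {α ν : Type} (key : α → String) (f : α → ν → ν) (d0 : ν) :
    ∀ (l : List α) (m : PySem.Dict String ν) (c : String),
    (l.foldl (fun m x => m.modify (key x) d0 (f x)) m).getD c d0
    = (l.filter (fun x => key x == c)).foldl (fun v x => f x v) (m.getD c d0) := by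
  intro l
  induction l with
  | nil => intro m c; rfl
  | cons x t ih =>
    intro m c
    rw [List.foldl_cons, ih, List.filter_cons]
    by_cases h : key x == c
    · have h' : c = key x := ((beq_iff_eq).1 h).symm
      rw [if_pos h, List.foldl_cons, PySem.Dict.getD_modify, if_pos h', h']
    · have h' : ¬ c = key x := fun e => h ((beq_iff_eq).2 e.symm)
      rw [if_neg h, PySem.Dict.getD_modify, if_neg h']

theorem ports_eq (l1 l2 : List (List (String × String))) (p : String) :
    join_lists_by_property l1 l2 p = join_lists_by_property_alt l1 l2 p := by
  unfold join_lists_by_property join_lists_by_property_alt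
  simp only []
  set keyD : PySem.Dict String String → String := fun d => d.getD p "" with hkeyD
  set keyL : List (String × String) → String := fun dl => (PySem.Dict.mk dl).getD p "" with hkeyL
  set chain := l1 ++ l2 with hchain
  set chainD := chain.map PySem.Dict.mk with hchainD
  set lst := PySem.List.sorted chainD keyD false with hlst
  set merged := chain.foldl
    (fun m dl => m.modify (keyL dl) PySem.Dict.empty (fun g => g.update dl))
    (PySem.Dict.empty : PySem.Dict String (PySem.Dict String String)) with hmerged
  -- A's result-append loop is a map over the groups
  rw [PySem.List.foldl_append_singleton_eq_map, List.nil_append]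
  rw [pyGroupBy_eq keyD lst (PySem.List.sorted_pairwise chainD keyD), List.map_map]
  -- B's key list is the set of keys of the input, sorted
  have hkeys : merged.keys = PySem.Set.ofList (chain.map keyL) := by
    rw [hmerged, PySem.Dict.keys_foldl_modify_key chain keyL PySem.Dict.empty
      (fun _ dl => fun g => g.update dl) PySem.Dict.empty, PySem.Dict.keys_empty]
    rfl
  -- … and that is exactly the list of run heads of the sorted chain
  have hperm : (firstKeys keyD lst).Perm (PySem.Set.ofList (chain.map keyL)) := by
    refine (List.perm_ext_iff_of_nodup ?_ (PySem.Set.nodup_ofList _)).2 ?_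
    · exact (pairwise_firstKeys keyD lst (PySem.List.sorted_pairwise chainD keyD)).imp
        (fun h => ne_of_lt h)
    · intro k
      rw [mem_firstKeys, PySem.Set.mem_ofList]
      have h1 : (lst.map keyD).Perm (chainD.map keyD) :=
        (PySem.List.sorted_perm chainD keyD false).map keyD
      rw [h1.mem_iff, hchainD, List.map_map]
      rfl
  have hsorted_eq : PySem.List.sorted merged.keys (fun k => k) false = firstKeys keyD lst := by
    rw [hkeys]
    exact PySem.List.sorted_eq_of_perm_of_pairwise_lt _ _ _ hperm
      (pairwise_firstKeys keyD lst (PySem.List.sorted_pairwise chainD keyD))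
  rw [hsorted_eq]
  apply List.map_congr_left
  intro k hk
  -- at each key the merged group dicts agree (stability of the sort)
  have hB : merged.getD k PySem.Dict.empty
      = (chain.filter (fun dl => keyL dl == k)).foldl
          (fun v dl => v.update dl) PySem.Dict.empty := by
    rw [hmerged, getD_foldl_modify keyL (fun dl => fun g => g.update dl) PySem.Dict.empty
      chain PySem.Dict.empty k, PySem.Dict.getD_empty]
  simp only [Function.comp_apply]
  rw [hB, hlst, sorted_filter_key keyD k chainD, hchainD, List.filter_map, List.foldl_map]
  rfl

-- ===== VERDICT (by name: the statement is the Claim_ definition above) =====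
theorem join_lists_by_property_spec : Claim_equal_join_lists_by_property := by
  intro l1 l2 p _ _
  exact ports_eq l1 l2 p
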